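-- pv_equiv track=rewrite | github.com/DevStarSJ/algorithmExercise | TopCoder/16.BatchSystem.SRM481.py | batch_system
-- ===== SOURCE A (Python) =====
-- def batch_system(duration, user):
--     user_time = {}
--     for i, v in enumerate(zip(user, duration)):
--         u, d = v
--         if v[0] not in user_time:
--             user_time[u] = (0, [])
--         user_time[u] = (user_time[u][0] + d, sorted(user_time[u][1] + [i]))
--
--     times = sorted(list(user_time.values()), key= lambda x: (x[0], x[1]))
--     result = []
--
--     for _, indexs in times:
--         result += indexs
--
--     return result
-- ===== SOURCE B (Python) =====
-- def batch_system(duration, user):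
--     # One pass computes each user's total duration and first-occurrence index;
--     # then the request indices are sorted DIRECTLY by (total, first, i) -- no
--     # per-user index lists are built, grouped or flattened.  This is exact:
--     # within a user the indices are increasing, and distinct users' index lists
--     # (disjoint, increasing, nonempty) compare lexicographically by their first
--     # elements, i.e. by the user's first-occurrence index.
--     tot = {}
--     first = {}
--     for i, (u, d) in enumerate(zip(user, duration)):
--         if u not in tot:
--             tot[u] = 0
--             first[u] = i
--         tot[u] += d
--     n = min(len(duration), len(user))
--     return sorted(range(n), key=lambda i: (tot[user[i]], first[user[i]], i))
-- ===== Notes on version B (the rewrite author's own statement) =====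
-- stated objective: faster
-- what changed: B never builds, re-sorts or flattens per-user index lists: one pass records each user's total duration and first-occurrence index, then the request indices are sorted directly by the key (total, first-occurrence, index), which provably reproduces A's group-then-flatten order.
import Mathlib
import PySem

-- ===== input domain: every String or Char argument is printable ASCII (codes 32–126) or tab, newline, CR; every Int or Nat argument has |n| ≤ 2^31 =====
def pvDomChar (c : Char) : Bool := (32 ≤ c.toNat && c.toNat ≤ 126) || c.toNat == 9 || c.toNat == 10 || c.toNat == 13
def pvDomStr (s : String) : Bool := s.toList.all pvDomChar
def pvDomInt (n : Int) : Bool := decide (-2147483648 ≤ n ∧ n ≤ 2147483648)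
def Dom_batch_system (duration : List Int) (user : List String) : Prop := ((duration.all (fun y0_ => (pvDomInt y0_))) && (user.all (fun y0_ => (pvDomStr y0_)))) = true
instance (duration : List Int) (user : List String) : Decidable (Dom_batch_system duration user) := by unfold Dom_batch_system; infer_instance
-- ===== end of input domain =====

-- B computes each user's total duration and first-occurrence index in one pass and sorts the
-- request indices DIRECTLY by the key (total, first, i) — no per-user index lists are built,
-- grouped or flattened (objective: faster — A re-sorts a growing index list on every request).

-- ===== PORT A =====
def batch_system (duration : List Int) (user : List String) : List Int :=
  let user_time := (PySem.List.enumerate (user.zip duration) 0).foldl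
    (fun ut x =>
      let i := x.1
      let u := x.2.1
      let d := x.2.2
      let ut := if ut.contains u = false then ut.insert u ((0 : Int), ([] : List Int)) else ut
      ut.insert u ((ut.getD u (0, [])).1 + d,
        PySem.List.sorted ((ut.getD u (0, [])).2 ++ [i]) (fun y => y) false))
    PySem.Dict.empty
  let times := PySem.List.sorted2 user_time.values (fun x => x.1) (fun x => x.2) false
  times.foldl (fun result x => result ++ x.2) []

-- ===== PORT B =====
-- The two dict[...] lookups in the sort key are ported as getD: every index 0 ≤ i < n has
-- user[i] present in both dicts, so Python's d[k] returns exactly that value there.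
-- Python's 3-tuple sort key (tot, first, i) is ported by hand as the nested Lex pair
-- toLex (tot, toLex (first, i)): Lex is exactly Python's lexicographic tuple comparison.
def batch_system_alt (duration : List Int) (user : List String) : List Int :=
  let st := (PySem.List.enumerate (user.zip duration) 0).foldl
    (fun st x =>
      let i := x.1
      let u := x.2.1
      let d := x.2.2
      let st := if st.1.contains u = false then (st.1.insert u (0 : Int), st.2.insert u i) else st
      (st.1.insert u (st.1.getD u 0 + d), st.2))
    ((PySem.Dict.empty : PySem.Dict String Int), (PySem.Dict.empty : PySem.Dict String Int))
  let n : Int := min (PySem.List.len duration) (PySem.List.len user)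
  PySem.List.sorted (PySem.List.pyRange 0 n 1)
    (fun i => (toLex (st.1.getD (PySem.List.pyGetD user i "") 0,
        toLex (st.2.getD (PySem.List.pyGetD user i "") 0, i)) : Lex (Int × Lex (Int × Int)))) false

-- ===== PRECONDITION & SPEC =====
def Spec_batch_system (duration : List Int) (user : List String) (out : List Int) : Prop := out = batch_system_alt duration user
instance (duration : List Int) (user : List String) (out : List Int) : Decidable (Spec_batch_system duration user out) := by unfold Spec_batch_system; infer_instance

-- ===== CLAIM (what is proved, stated in full; the proofs are below) =====
def Claim_equal_batch_system : Prop := ∀ (duration : List Int) (user : List String), Dom_batch_system duration user → Spec_batch_system duration user (batch_system duration user)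

-- ===== LEMMAS AND PROOFS =====

-- total duration of the requests of user u in zs
def grpT : List (String × Int) → String → Int
  | [], _ => 0
  | (v, d) :: zs, u => (if v = u then d else 0) + grpT zs u

-- the request indices of user u in zs, counting from n0
def grpI (n0 : Int) : List (String × Int) → String → List Int
  | [], _ => []
  | (v, _) :: zs, u => (if v = u then [n0] else []) ++ grpI (n0 + 1) zs u

theorem grpT_cons (v : String) (d : Int) (zs : List (String × Int)) (u : String) :
    grpT ((v, d) :: zs) u = (if v = u then d else 0) + grpT zs u := rfl

theorem grpI_cons (n0 : Int) (v : String) (d : Int) (zs : List (String × Int)) (u : String) :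
    grpI n0 ((v, d) :: zs) u = (if v = u then [n0] else []) ++ grpI (n0 + 1) zs u := rfl

-- membership in grpI: exactly the positions of u's requests
theorem grpI_mem (n0 : Int) (zs : List (String × Int)) (u : String) (i : Int) :
    i ∈ grpI n0 zs u ↔ ∃ (k : Nat) (hk : k < zs.length), i = n0 + k ∧ (zs[k]).1 = u := by
  induction zs generalizing n0 with
  | nil => simp [grpI]
  | cons z zs ih =>
    obtain ⟨v, d⟩ := z
    rw [grpI_cons]
    constructor
    · intro h
      rcases List.mem_append.mp h with h | h
      · split_ifs at h with hv
        · simp at h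
          exact ⟨0, by simp, by omega, by simpa using hv⟩
        · simp at h
      · obtain ⟨k, hk, hik, hu⟩ := (ih (n0 + 1)).mp h
        exact ⟨k + 1, by simpa using hk, by push_cast; omega, by simpa using hu⟩
    · rintro ⟨k, hk, hik, hu⟩
      cases k with
      | zero =>
        simp at hu
        subst hu
        simp at hik
        simp [hik]
      | succ k =>
        apply List.mem_append_right
        refine (ih (n0 + 1)).mpr ⟨k, by simpa using hk, by push_cast at hik ⊢; omega, by simpa using hu⟩

theorem grpI_lb (n0 : Int) (zs : List (String × Int)) (u : String) (i : Int) (h : i ∈ grpI n0 zs u) :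
    n0 ≤ i := by
  obtain ⟨k, hk, hik, _⟩ := (grpI_mem n0 zs u i).mp h
  omega

theorem grpI_pairwise (n0 : Int) (zs : List (String × Int)) (u : String) :
    (grpI n0 zs u).Pairwise (· < ·) := by
  induction zs generalizing n0 with
  | nil => simp [grpI]
  | cons z zs ih =>
    obtain ⟨v, d⟩ := z
    rw [grpI_cons]
    split_ifs with hv
    · simp only [List.singleton_append, List.pairwise_cons]
      exact ⟨fun j hj => lt_of_lt_of_le (by omega) (grpI_lb _ _ _ _ hj), ih (n0 + 1)⟩
    · simpa using ih (n0 + 1)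

theorem grpI_ne_nil (n0 : Int) (zs : List (String × Int)) (p : String × Int) (h : p ∈ zs) :
    grpI n0 zs p.1 ≠ [] := by
  obtain ⟨k, hk, hp⟩ := List.mem_iff_getElem.mp h
  intro hnil
  have : (n0 + k : Int) ∈ grpI n0 zs p.1 := (grpI_mem _ _ _ _).mpr ⟨k, hk, rfl, by rw [hp]⟩
  rw [hnil] at this
  simp at this

-- appending an index larger than everything in a strictly increasing list is already sorted
theorem sorted_app_single (l : List Int) (n : Int)
    (hp : l.Pairwise (· < ·)) (hlt : ∀ j ∈ l, j < n) :
    PySem.List.sorted (l ++ [n]) (fun y => y) false = l ++ [n] := by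
  apply PySem.List.sorted_eq_self_of_pairwise
  refine List.pairwise_append.2 ⟨hp.imp (fun h => le_of_lt h), List.pairwise_singleton _ _, ?_⟩
  intro a ha b hb
  simp at hb; subst hb
  exact le_of_lt (hlt a ha)

-- A's grouping loop (re-sorting the index list each step) equals a plain appending fold,
-- for any start dict whose stored index lists are increasing and below the next index.
theorem dicts_eq (zs : List (String × Int)) (n : Int)
    (d : PySem.Dict String (Int × List Int))
    (hinv : ∀ u t l, d.get? u = some (t, l) → l.Pairwise (· < ·) ∧ ∀ j ∈ l, j < n) :
    (PySem.List.enumerate zs n).foldl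
      (fun ut x =>
        let i := x.1
        let u := x.2.1
        let dd := x.2.2
        let ut := if ut.contains u = false then ut.insert u ((0 : Int), ([] : List Int)) else ut
        ut.insert u ((ut.getD u (0, [])).1 + dd,
          PySem.List.sorted ((ut.getD u (0, [])).2 ++ [i]) (fun y => y) false)) d
    = (PySem.List.enumerate zs n).foldl
      (fun g x =>
        g.insert x.2.1 (match g.get? x.2.1 with
          | none => (x.2.2, [x.1])
          | some p => (p.1 + x.2.2, p.2 ++ [x.1]))) d := by
  induction zs generalizing n d with
  | nil => simp [PySem.List.enumerate]
  | cons z zs ih =>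
    obtain ⟨u, dd⟩ := z
    rw [PySem.List.enumerate_cons, List.foldl_cons, List.foldl_cons]
    simp only
    rcases hg : d.get? u with _ | ⟨t, l⟩
    · -- fresh user
      have hc : d.contains u = false := by
        rw [PySem.Dict.contains_eq_isSome_get?, hg]; rfl
      rw [if_pos hc]
      simp only [PySem.Dict.getD_insert_self, List.nil_append, zero_add,
        PySem.Dict.insert_insert_self]
      rw [show PySem.List.sorted [n] (fun y => y) false = [n] from rfl]
      apply ih
      intro u' t' l' h'
      rw [PySem.Dict.get?_insert] at h'
      split_ifs at h' with he
      · cases h'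
        exact ⟨List.pairwise_singleton _ _, by simp⟩
      · obtain ⟨h1, h2⟩ := hinv u' t' l' h'
        exact ⟨h1, fun j hj => lt_trans (h2 j hj) (by omega)⟩
    · -- existing user
      have hc : d.contains u = true := by
        rw [PySem.Dict.contains_eq_isSome_get?, hg]; rfl
      obtain ⟨hp, hlt⟩ := hinv u t l hg
      rw [if_neg (by simp [hc])]
      rw [PySem.Dict.getD_eq_get?_getD, hg]
      simp only [Option.getD_some]
      rw [sorted_app_single l n hp hlt]
      apply ih
      intro u' t' l' h'
      rw [PySem.Dict.get?_insert] at h'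
      split_ifs at h' with he
      · cases h'
        constructor
        · refine List.pairwise_append.2 ⟨hp, List.pairwise_singleton _ _, ?_⟩
          intro a ha b hb; simp at hb; subst hb; exact hlt a ha
        · intro j hj; simp at hj
          rcases hj with hj | hj
          · exact lt_trans (hlt j hj) (by omega)
          · omega
      · obtain ⟨h1, h2⟩ := hinv u' t' l' h'
        exact ⟨h1, fun j hj => lt_trans (h2 j hj) (by omega)⟩

theorem astate (zs : List (String × Int)) (n0 : Int) (g : PySem.Dict String (Int × List Int)) (u : String) :
    ((PySem.List.enumerate zs n0).foldl
      (fun g x =>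
        g.insert x.2.1 (match g.get? x.2.1 with
          | none => (x.2.2, [x.1])
          | some p => (p.1 + x.2.2, p.2 ++ [x.1]))) g).get? u
    = match g.get? u with
      | none => if grpI n0 zs u = [] then none else some (grpT zs u, grpI n0 zs u)
      | some p => some (p.1 + grpT zs u, p.2 ++ grpI n0 zs u) := by
  induction zs generalizing n0 g with
  | nil =>
    simp only [PySem.List.enumerate_nil, List.foldl_nil, grpI, grpT]
    rcases g.get? u with _ | ⟨t, l⟩ <;> simp
  | cons z zs ih =>
    obtain ⟨v, d⟩ := z
    rw [PySem.List.enumerate_cons, List.foldl_cons]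
    simp only
    rw [ih]
    by_cases hv : v = u
    · subst hv
      rw [PySem.Dict.get?_insert_self, grpI_cons, grpT_cons, if_pos rfl, if_pos rfl]
      rcases g.get? v with _ | ⟨t, l⟩
      · simp
      · simp
        ring_nf
    · rw [PySem.Dict.get?_insert_of_ne _ _ (Ne.symm hv), grpI_cons, grpT_cons,
        if_neg hv, if_neg hv]
      simp

theorem bstate (zs : List (String × Int)) (n0 : Int) (t0 f0 : PySem.Dict String Int) (u : String) :
    (((PySem.List.enumerate zs n0).foldl
      (fun st x =>
        let st := if st.1.contains x.2.1 = false then (st.1.insert x.2.1 (0 : Int), st.2.insert x.2.1 x.1) else st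
        (st.1.insert x.2.1 (st.1.getD x.2.1 0 + x.2.2), st.2)) (t0, f0)).1.getD u 0
        = t0.getD u 0 + grpT zs u)
    ∧ (((PySem.List.enumerate zs n0).foldl
      (fun st x =>
        let st := if st.1.contains x.2.1 = false then (st.1.insert x.2.1 (0 : Int), st.2.insert x.2.1 x.1) else st
        (st.1.insert x.2.1 (st.1.getD x.2.1 0 + x.2.2), st.2)) (t0, f0)).2.get? u
        = if t0.contains u = true then f0.get? u else ((grpI n0 zs u).head?.or (f0.get? u))) := by
  induction zs generalizing n0 t0 f0 with
  | nil =>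
    simp only [PySem.List.enumerate_nil, List.foldl_nil, grpI, grpT]
    constructor
    · simp
    · split_ifs <;> simp
  | cons z zs ih =>
    obtain ⟨v, d⟩ := z
    rw [PySem.List.enumerate_cons, List.foldl_cons]
    simp only
    by_cases hc : t0.contains v = false
    · rw [if_pos hc]
      simp only [PySem.Dict.getD_insert_self, zero_add, PySem.Dict.insert_insert_self]
      obtain ⟨ih1, ih2⟩ := ih (n0 + 1) (t0.insert v d) (f0.insert v n0)
      constructor
      · rw [ih1, grpT_cons]
        by_cases hv : v = u
        · subst hv
          rw [PySem.Dict.getD_insert_self, PySem.Dict.getD_of_not_contains t0 0 hc, if_pos rfl]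
          ring
        · rw [PySem.Dict.getD_insert_of_ne _ _ _ (Ne.symm hv), if_neg hv]
          ring
      · rw [ih2, grpI_cons]
        by_cases hv : v = u
        · subst hv
          rw [PySem.Dict.contains_insert_self, if_pos rfl, if_pos rfl, hc,
            PySem.Dict.get?_insert_self]
          simp
        · rw [PySem.Dict.contains_insert,
            PySem.Dict.get?_insert_of_ne _ _ (Ne.symm hv), if_neg hv]
          have hb : (u == v) = false := by simp [Ne.symm hv]
          rw [hb]
          simp
    · rw [if_neg hc]
      rw [Bool.not_eq_false] at hc
      obtain ⟨ih1, ih2⟩ := ih (n0 + 1) (t0.insert v (t0.getD v 0 + d)) f0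
      constructor
      · rw [ih1, grpT_cons]
        by_cases hv : v = u
        · subst hv
          rw [PySem.Dict.getD_insert_self, if_pos rfl]
          ring
        · rw [PySem.Dict.getD_insert_of_ne _ _ _ (Ne.symm hv), if_neg hv]
          ring
      · rw [ih2, grpI_cons]
        by_cases hv : v = u
        · subst hv
          rw [PySem.Dict.contains_insert_self, if_pos rfl, if_pos hc]
        · rw [PySem.Dict.contains_insert, if_neg hv]
          have hb : (u == v) = false := by simp [Ne.symm hv]
          rw [hb]
          simp

theorem flatMap_append_perm {α β : Type} (ks : List α) (f g : α → List β) :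
    (ks.flatMap (fun u => f u ++ g u)).Perm (ks.flatMap f ++ ks.flatMap g) := by
  induction ks with
  | nil => simp
  | cons a ks ih =>
    simp only [List.flatMap_cons]
    have h1 : (f a ++ g a ++ ks.flatMap fun u => f u ++ g u).Perm
        (f a ++ g a ++ (ks.flatMap f ++ ks.flatMap g)) := (ih.append_left _)
    refine h1.trans ?_
    have h2 : (g a ++ (ks.flatMap f ++ ks.flatMap g)).Perm
        (ks.flatMap f ++ (g a ++ ks.flatMap g)) := by
      rw [← List.append_assoc, ← List.append_assoc]
      exact (List.perm_append_comm).append_right _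
    rw [List.append_assoc, List.append_assoc]
    exact h2.append_left (f a)

theorem flatMap_ite_nil {β : Type} (ks : List String) (v : String) (l : List β)
    (h : v ∉ ks) : (ks.flatMap (fun u => if v = u then l else [])) = [] := by
  induction ks with
  | nil => simp
  | cons a ks ih =>
    simp only [List.flatMap_cons]
    rw [if_neg (by rintro rfl; exact h (List.mem_cons_self)), ih (fun hm => h (List.mem_cons_of_mem _ hm))]
    simp

theorem flatMap_ite_single {β : Type} (ks : List String) (v : String) (l : List β)
    (hnd : ks.Nodup) (hv : v ∈ ks) : (ks.flatMap (fun u => if v = u then l else [])) = l := by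
  induction ks with
  | nil => simp at hv
  | cons a ks ih =>
    simp only [List.flatMap_cons]
    rcases List.nodup_cons.mp hnd with ⟨ha, hnd'⟩
    by_cases hva : v = a
    · subst hva
      rw [if_pos rfl, flatMap_ite_nil ks v l ha]
      simp
    · rw [if_neg hva, ih hnd' (by rcases List.mem_cons.mp hv with h | h; exact absurd h hva; exact h)]
      simp

theorem grp_perm (zs : List (String × Int)) (n0 : Int) (ks : List String)
    (hnd : ks.Nodup) (hcov : ∀ p ∈ zs, p.1 ∈ ks) :
    (ks.flatMap (fun u => grpI n0 zs u)).Perm (PySem.List.pyRange n0 (n0 + zs.length) 1) := by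
  induction zs generalizing n0 with
  | nil =>
    simp [grpI, PySem.List.pyRange_one_eq_nil]
  | cons z zs ih =>
    obtain ⟨v, d⟩ := z
    have hv : v ∈ ks := hcov (v, d) List.mem_cons_self
    simp only [grpI_cons]
    refine (flatMap_append_perm ks _ _).trans ?_
    rw [flatMap_ite_single ks v [n0] hnd hv]
    have hrec := ih (n0 + 1) (fun p hp => hcov p (List.mem_cons_of_mem _ hp))
    have hcons : PySem.List.pyRange n0 (n0 + ((v, d) :: zs).length) 1
        = n0 :: PySem.List.pyRange (n0 + 1) (n0 + 1 + zs.length) 1 := by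
      have hlen : (n0 + (((v, d) :: zs).length : Int)) = n0 + 1 + (zs.length : Int) := by
        simp only [List.length_cons]
        push_cast
        ring
      rw [hlen, PySem.List.pyRange_one_cons (by omega)]
    rw [hcons]
    exact (hrec.append_left [n0]).trans (by rfl)


-- the output of an insertion step keeps "earlier never ordered after later"
theorem insertBy_pairwise {α : Type} (before : α → α → Bool) (x : α) (ys : List α)
    (hasym : ∀ a b, before a b = true → before b a = false)
    (htrans : ∀ a b c, before a b = true → before c b = false → before c a = false)
    (h : ys.Pairwise (fun a b => before b a = false)) :
    (PySem.List.insertBy before x ys).Pairwise (fun a b => before b a = false) := by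
  induction ys with
  | nil => simp [PySem.List.insertBy]
  | cons y ys ih =>
    rw [PySem.List.insertBy]
    rcases List.pairwise_cons.mp h with ⟨hy, hys⟩
    by_cases hb : before x y = true
    · rw [if_pos hb]
      refine List.pairwise_cons.mpr ⟨?_, h⟩
      intro z hz
      rcases List.mem_cons.mp hz with rfl | hz
      · exact hasym _ _ hb
      · exact htrans x y z hb (hy z hz)
    · rw [if_neg hb]
      refine List.pairwise_cons.mpr ⟨?_, ih hys⟩
      intro z hz
      rcases (PySem.List.mem_insertBy before x z ys).mp hz with rfl | hz
      · exact Bool.eq_false_iff.mpr hb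
      · exact hy z hz

-- insertion sort produces a list in which no element is strictly before an earlier one
theorem foldl_insertBy_pairwise {α : Type} (before : α → α → Bool) (l : List α)
    (hasym : ∀ a b, before a b = true → before b a = false)
    (htrans : ∀ a b c, before a b = true → before c b = false → before c a = false) :
    (l.foldl (fun acc x => PySem.List.insertBy before x acc) []).Pairwise
      (fun a b => before b a = false) := by
  suffices h : ∀ acc : List α, acc.Pairwise (fun a b => before b a = false) →
      (l.foldl (fun acc x => PySem.List.insertBy before x acc) acc).Pairwise
        (fun a b => before b a = false) from h [] (by simp)
  induction l with
  | nil => intro acc hacc; simpa using hacc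
  | cons x l ih =>
    intro acc hacc
    rw [List.foldl_cons]
    exact ih _ (insertBy_pairwise before x acc hasym htrans hacc)

-- A's sort comparator: Python's tuple key (x[0], x[1]) compared lexicographically
def pvBefore (a b : Int × List Int) : Bool :=
  decide (a.1 < b.1) || (!decide (b.1 < a.1) && decide (a.2 < b.2))

theorem pvBefore_iff (a b : Int × List Int) :
    pvBefore a b = true ↔ (a.1 < b.1 ∨ (¬ b.1 < a.1 ∧ a.2 < b.2)) := by
  simp [pvBefore]

theorem pvBefore_false_iff (a b : Int × List Int) :
    pvBefore a b = false ↔ (¬ a.1 < b.1 ∧ (¬ b.1 < a.1 → ¬ a.2 < b.2)) := by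
  rw [Bool.eq_false_iff]
  rw [ne_eq, pvBefore_iff]
  push Not
  rfl

theorem pvBefore_asym (a b : Int × List Int) (h : pvBefore a b = true) : pvBefore b a = false := by
  rw [pvBefore_iff] at h
  rw [pvBefore_false_iff]
  rcases h with h | ⟨h1, h2⟩
  · exact ⟨lt_asymm h, fun hn => absurd h hn⟩
  · exact ⟨h1, fun _ => lt_asymm h2⟩

theorem pvBefore_trans (a b c : Int × List Int) (h : pvBefore a b = true)
    (h2 : pvBefore c b = false) : pvBefore c a = false := by
  rw [pvBefore_iff] at h
  rw [pvBefore_false_iff] at h2 ⊢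
  obtain ⟨hcb, h2'⟩ := h2
  have hbc : b.1 ≤ c.1 := not_lt.mp hcb
  rcases h with h | ⟨h1, hl⟩
  · exact ⟨by omega, fun hn => absurd (show a.1 < c.1 by omega) hn⟩
  · have hab : a.1 ≤ b.1 := not_lt.mp h1
    refine ⟨by omega, fun hnac => ?_⟩
    have hca : c.1 ≤ a.1 := not_lt.mp hnac
    have hcb2 : ¬ c.2 < b.2 := h2' (by omega)
    exact lt_asymm (lt_of_lt_of_le hl (not_lt.mp hcb2))

-- ===== VERDICT (by name: the statement is the Claim_ definition above) =====
theorem batch_system_spec : Claim_equal_batch_system := by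
  intro duration user _
  unfold Spec_batch_system batch_system batch_system_alt
  rw [dicts_eq (user.zip duration) 0 PySem.Dict.empty
        (by intro u t l h; rw [PySem.Dict.get?_empty] at h; cases h)]
  simp only [PySem.List.foldl_append_eq_flatMap, List.nil_append]
  set zs := user.zip duration with hzs
  set G := List.foldl
      (fun (g : PySem.Dict String (Int × List Int)) (x : Int × String × Int) =>
        g.insert x.2.1
          (match g.get? x.2.1 with
          | none => (x.2.2, [x.1])
          | some p => (p.1 + x.2.2, p.2 ++ [x.1])))
      PySem.Dict.empty (PySem.List.enumerate zs 0) with hGdef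
  set F := List.foldl
      (fun (st : PySem.Dict String Int × PySem.Dict String Int) (x : Int × String × Int) =>
        ((if st.1.contains x.2.1 = false then (st.1.insert x.2.1 0, st.2.insert x.2.1 x.1) else st).1.insert
            x.2.1
            ((if st.1.contains x.2.1 = false then (st.1.insert x.2.1 0, st.2.insert x.2.1 x.1) else st).1.getD
                x.2.1 0 + x.2.2),
          (if st.1.contains x.2.1 = false then (st.1.insert x.2.1 0, st.2.insert x.2.1 x.1) else st).2))
      (PySem.Dict.empty, PySem.Dict.empty) (PySem.List.enumerate zs 0) with hFdef
  -- characterizations of the two folds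
  have hG : ∀ u, G.get? u = if grpI 0 zs u = [] then none else some (grpT zs u, grpI 0 zs u) := by
    intro u
    have h := astate zs 0 PySem.Dict.empty u
    rw [PySem.Dict.get?_empty] at h
    exact h
  have htot : ∀ u, F.1.getD u 0 = grpT zs u := by
    intro u
    have h := (bstate zs 0 PySem.Dict.empty PySem.Dict.empty u).1
    rw [PySem.Dict.getD_empty, zero_add] at h
    exact h
  have hfst : ∀ u, F.2.get? u = (grpI 0 zs u).head? := by
    intro u
    have h := (bstate zs 0 PySem.Dict.empty PySem.Dict.empty u).2
    simp only [PySem.Dict.contains_empty, PySem.Dict.get?_empty, Bool.false_eq_true, if_false,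
      Option.or_none] at h
    exact h
  have hnodupK : G.keys.Nodup := by
    rw [hGdef]
    exact PySem.Dict.nodup_keys_foldl_insert_key (PySem.List.enumerate zs 0)
      (fun x => x.2.1)
      (fun g x => match g.get? x.2.1 with
        | none => (x.2.2, [x.1])
        | some p => (p.1 + x.2.2, p.2 ++ [x.1]))
      PySem.Dict.empty PySem.Dict.nodup_keys_empty
  have hmemkeys : ∀ u, u ∈ G.keys ↔ grpI 0 zs u ≠ [] := by
    intro u
    rw [← PySem.Dict.contains_iff_mem_keys, PySem.Dict.contains_eq_isSome_get?, hG u]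
    by_cases hnil : grpI 0 zs u = [] <;> simp [hnil]
  have hvals : G.values = G.keys.map (fun u => (grpT zs u, grpI 0 zs u)) := by
    rw [PySem.Dict.values_eq_map_keys G hnodupK ((0 : Int), ([] : List Int))]
    apply List.map_congr_left
    intro u hu
    rw [PySem.Dict.getD_eq_get?_getD, hG u, if_neg ((hmemkeys u).mp hu)]
    rfl
  have huser : ∀ u i, i ∈ grpI 0 zs u → PySem.List.pyGetD user i "" = u := by
    intro u i hi
    obtain ⟨k, hk, rfl, hu⟩ := (grpI_mem 0 zs u i).mp hi
    have hkl : k < user.length := by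
      rw [hzs, List.length_zip] at hk
      omega
    have hdl : k < duration.length := by
      rw [hzs, List.length_zip] at hk
      omega
    have hzk : zs[k]'hk = (user[k]'hkl, duration[k]'hdl) := List.getElem_zip ..
    rw [zero_add, PySem.List.pyGetD_natCast, List.getD_eq_getElem _ _ hkl, ← hu, hzk]
  have hkeyval : ∀ u, ∀ i ∈ grpI 0 zs u,
      (toLex (F.1.getD (PySem.List.pyGetD user i "") 0,
        toLex (F.2.getD (PySem.List.pyGetD user i "") 0, i)) : Lex (Int × Lex (Int × Int)))
      = toLex (grpT zs u, toLex ((grpI 0 zs u).head?.getD 0, i)) := by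
    intro u i hi
    rw [huser u i hi, htot u, PySem.Dict.getD_eq_get?_getD, hfst u]
  have hcov : ∀ p ∈ zs, p.1 ∈ G.keys := fun p hp => (hmemkeys p.1).mpr (grpI_ne_nil 0 zs p hp)
  have hn : min (PySem.List.len duration) (PySem.List.len user) = (zs.length : Int) := by
    rw [hzs, List.length_zip]
    simp only [PySem.List.len]
    push_cast
    omega
  rw [hn]
  -- A's sorted group list
  have hSperm : (PySem.List.sorted2 G.values (fun x => x.1) (fun x => x.2)).Perm G.values :=
    PySem.List.sorted2_perm G.values _ _ false
  have hSfold : PySem.List.sorted2 G.values (fun x => x.1) (fun x => x.2)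
      = G.values.foldl (fun acc x => PySem.List.insertBy pvBefore x acc) [] := rfl
  have hSpair : (PySem.List.sorted2 G.values (fun x => x.1) (fun x => x.2)).Pairwise
      (fun a b => pvBefore b a = false) := by
    rw [hSfold]
    exact foldl_insertBy_pairwise pvBefore G.values pvBefore_asym pvBefore_trans
  have hvalsnodup : G.values.Nodup := by
    rw [hvals]
    refine (List.nodup_map_iff_inj_on hnodupK).mpr ?_
    intro u1 h1 u2 h2 heq
    obtain ⟨hT, hI⟩ := Prod.mk.injEq .. ▸ heq
    obtain ⟨i, hi⟩ := List.exists_mem_of_ne_nil _ ((hmemkeys u1).mp h1)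
    have hi2 : i ∈ grpI 0 zs u2 := hI ▸ hi
    rw [← huser u1 i hi, ← huser u2 i hi2]
  have hSne : (PySem.List.sorted2 G.values (fun x => x.1) (fun x => x.2)).Pairwise (· ≠ ·) :=
    (hSperm.nodup_iff).mpr hvalsnodup
  have hmemS : ∀ p ∈ PySem.List.sorted2 G.values (fun x => x.1) (fun x => x.2),
      ∃ u ∈ G.keys, p = (grpT zs u, grpI 0 zs u) := by
    intro p hp
    have : p ∈ G.values := hSperm.mem_iff.mp hp
    rw [hvals] at this
    obtain ⟨u, hu, hpu⟩ := List.mem_map.mp this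
    exact ⟨u, hu, hpu.symm⟩
  symm
  refine PySem.List.sorted_eq_of_perm_of_pairwise_lt _ _ _ ?_ ?_
  · -- permutation
    rw [List.flatMap_def]
    refine ((hSperm.map Prod.snd).flatten).trans ?_
    rw [hvals, List.map_map]
    have hcomp : (Prod.snd ∘ fun u => ((grpT zs u, grpI 0 zs u) : Int × List Int))
        = fun u => grpI 0 zs u := rfl
    rw [hcomp, ← List.flatMap_def]
    have := grp_perm zs 0 G.keys hnodupK hcov
    rwa [zero_add] at this
  · -- strict pairwise in B's key
    rw [List.flatMap_def]
    rw [List.pairwise_flatten]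
    constructor
    · -- within one user's index list
      intro l hl
      obtain ⟨p, hp, rfl⟩ := List.mem_map.mp hl
      obtain ⟨u, hu, rfl⟩ := hmemS p hp
      refine (grpI_pairwise 0 zs u).imp_of_mem ?_
      intro i j hi hj hij
      rw [hkeyval u i hi, hkeyval u j hj]
      exact Prod.Lex.lt_iff.mpr (Or.inr ⟨rfl, Prod.Lex.lt_iff.mpr (Or.inr ⟨rfl, hij⟩)⟩)
    · -- across two different users' lists
      rw [List.pairwise_map]
      refine (hSpair.and hSne).imp_of_mem ?_
      rintro p q hp hq ⟨hbf, hne⟩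
      obtain ⟨u1, hu1, rfl⟩ := hmemS p hp
      obtain ⟨u2, hu2, rfl⟩ := hmemS q hq
      intro i hi j hj
      rw [hkeyval u1 i hi, hkeyval u2 j hj]
      rw [pvBefore_false_iff] at hbf
      obtain ⟨hbf1, hbf2⟩ := hbf
      simp only at hbf1 hbf2
      rcases lt_trichotomy (grpT zs u1) (grpT zs u2) with hT | hT | hT
      · exact Prod.Lex.lt_iff.mpr (Or.inl hT)
      · have hnL : ¬ grpI 0 zs u2 < grpI 0 zs u1 := hbf2 (by omega)
        have hneL : grpI 0 zs u1 ≠ grpI 0 zs u2 := by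
          intro hIeq
          exact hne (by rw [hT, hIeq])
        have hL : grpI 0 zs u1 < grpI 0 zs u2 := lt_of_le_of_ne (not_lt.mp hnL) hneL
        obtain ⟨h1, r1, hL1⟩ := List.exists_cons_of_ne_nil ((hmemkeys u1).mp hu1)
        obtain ⟨h2, r2, hL2⟩ := List.exists_cons_of_ne_nil ((hmemkeys u2).mp hu2)
        rw [hL1, hL2, List.cons_lt_cons_iff] at hL
        have hh : h1 < h2 := by
          rcases hL with hL | ⟨hL, _⟩
          · exact hL
          · exfalso
            apply hneL
            have hm1 : h1 ∈ grpI 0 zs u1 := by rw [hL1]; exact List.mem_cons_self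
            have hm2 : h1 ∈ grpI 0 zs u2 := by rw [hL2, hL]; exact List.mem_cons_self
            rw [← huser u1 h1 hm1, ← huser u2 h1 hm2]
        refine Prod.Lex.lt_iff.mpr (Or.inr ⟨hT, Prod.Lex.lt_iff.mpr (Or.inl ?_)⟩)
        rw [hL1, hL2]
        simpa using hh
      · exact absurd hT hbf1
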